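-- pv_equiv track=rewrite | github.com/Rust1667/a-FMHY-search-engine | fmhy-search.py | moveExactMatchesToFront
-- ===== SOURCE A (Python) =====
-- def checkMultiWordQueryContainedExactlyInLine(line, searchQuery):
--     if len(searchQuery.split(' ')) <= 1:
--         return False
--     return (searchQuery.lower() in line.lower())
--
-- def moveExactMatchesToFront(myList, searchQuery):
--     bumped = []
--     notBumped = []
--     for element in myList:
--         if checkMultiWordQueryContainedExactlyInLine(element, searchQuery):
--             bumped.append(element)
--         else:
--             notBumped.append(element)
--     return (bumped + notBumped)
-- ===== SOURCE B (Python) =====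
-- def checkMultiWordQueryContainedExactlyInLine(line, searchQuery):
--     if len(searchQuery.split(' ')) <= 1:
--         return False
--     return (searchQuery.lower() in line.lower())
--
-- def moveExactMatchesToFront(myList, searchQuery):
--     return sorted(myList, key=lambda element: not checkMultiWordQueryContainedExactlyInLine(element, searchQuery))
-- ===== Notes on version B (the rewrite author's own statement) =====
-- stated objective: idiomatic
-- what changed: Replaced the explicit two-accumulator partition loop with a single stable sort keyed on the negated match predicate, relying on sort stability to keep each group's original order.
import Mathlib
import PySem

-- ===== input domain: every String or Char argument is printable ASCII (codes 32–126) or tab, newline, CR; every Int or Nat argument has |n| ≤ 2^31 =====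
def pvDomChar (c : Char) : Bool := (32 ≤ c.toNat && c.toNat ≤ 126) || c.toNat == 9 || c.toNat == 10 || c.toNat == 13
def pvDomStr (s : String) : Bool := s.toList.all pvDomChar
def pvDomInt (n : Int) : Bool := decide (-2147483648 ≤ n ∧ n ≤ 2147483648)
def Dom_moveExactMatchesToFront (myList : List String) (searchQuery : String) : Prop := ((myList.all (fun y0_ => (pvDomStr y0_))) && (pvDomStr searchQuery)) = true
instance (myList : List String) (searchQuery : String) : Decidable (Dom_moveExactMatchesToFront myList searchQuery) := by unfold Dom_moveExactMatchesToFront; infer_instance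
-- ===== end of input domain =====

-- B replaces A's two-accumulator partition loop with one stable sort keyed on the
-- negated match predicate (idiomatic; same result, stability preserves group order).

-- ===== PORT A =====
-- helper: checkMultiWordQueryContainedExactlyInLine (shared by both Pythons, ported once)
def checkMultiWordQueryContainedExactlyInLine (line : String) (searchQuery : String) : Bool :=
  if ((PySem.Str.split? searchQuery " ").getD []).length ≤ 1 then false  -- sep " " ≠ "", so split? is `some`
  else PySem.Str.isIn (PySem.Str.lower searchQuery) (PySem.Str.lower line)

def moveExactMatchesToFront (myList : List String) (searchQuery : String) : List String :=
  let acc := myList.foldl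
    (fun (acc : List String × List String) element =>
      if checkMultiWordQueryContainedExactlyInLine element searchQuery then
        (acc.1 ++ [element], acc.2)
      else
        (acc.1, acc.2 ++ [element]))
    ([], [])
  acc.1 ++ acc.2

-- ===== PORT B =====
def moveExactMatchesToFront_alt (myList : List String) (searchQuery : String) : List String :=
  PySem.List.sorted myList
    (fun element => !checkMultiWordQueryContainedExactlyInLine element searchQuery) false

-- ===== PRECONDITION & SPEC =====
def Spec_moveExactMatchesToFront (myList : List String) (searchQuery : String) (out : List String) : Prop := out = moveExactMatchesToFront_alt myList searchQuery
instance (myList : List String) (searchQuery : String) (out : List String) : Decidable (Spec_moveExactMatchesToFront myList searchQuery out) := by unfold Spec_moveExactMatchesToFront; infer_instance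

-- ===== CLAIM (what is proved, stated in full; the proofs are below) =====
def Claim_equal_moveExactMatchesToFront : Prop := ∀ (myList : List String) (searchQuery : String), Dom_moveExactMatchesToFront myList searchQuery → Spec_moveExactMatchesToFront myList searchQuery (moveExactMatchesToFront myList searchQuery)

-- ===== LEMMAS AND PROOFS =====

-- inserting a false-key element skips the false block and lands in front of the true block
theorem insertBy_key_false {α : Type} (k : α → Bool) (x : α) (F T : List α)
    (hx : k x = false) (hF : ∀ a ∈ F, k a = false) (hT : ∀ a ∈ T, k a = true) :
    PySem.List.insertBy (fun a b => decide (k a < k b)) x (F ++ T) = F ++ x :: T := by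
  induction F with
  | nil =>
    cases T with
    | nil => simp [PySem.List.insertBy]
    | cons t ts =>
      have ht : k t = true := hT t (by simp)
      simp [PySem.List.insertBy, hx, ht]
  | cons f F' ih =>
    have hf : k f = false := hF f (by simp)
    simp only [List.cons_append, PySem.List.insertBy, hx, hf]
    simp only [decide_eq_true_eq]
    rw [if_neg (by simp)]
    rw [ih (fun a ha => hF a (by simp [ha]))]

-- inserting a true-key element always goes to the very end
theorem insertBy_key_true {α : Type} (k : α → Bool) (x : α) (L : List α)
    (hx : k x = true) :
    PySem.List.insertBy (fun a b => decide (k a < k b)) x L = L ++ [x] := by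
  induction L with
  | nil => simp [PySem.List.insertBy]
  | cons y ys ih =>
    simp only [PySem.List.insertBy, hx]
    rw [if_neg (by cases h : k y <;> simp), ih]
    simp

-- the insertion-sort fold over a boolean key partitions: false-key block then true-key block
theorem foldl_insertBy_partition {α : Type} (k : α → Bool) (xs : List α)
    (F T : List α) (hF : ∀ a ∈ F, k a = false) (hT : ∀ a ∈ T, k a = true) :
    xs.foldl (fun acc x => PySem.List.insertBy (fun a b => decide (k a < k b)) x acc) (F ++ T)
      = (F ++ xs.filter (fun a => !k a)) ++ (T ++ xs.filter k) := by
  induction xs generalizing F T with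
  | nil => simp
  | cons x xs ih =>
    simp only [List.foldl_cons]
    cases hx : k x with
    | false =>
      rw [insertBy_key_false k x F T hx hF hT]
      have : F ++ x :: T = (F ++ [x]) ++ T := by simp
      rw [this, ih (F ++ [x]) T
        (by intro a ha; rcases List.mem_append.1 ha with h | h
            · exact hF a h
            · simp at h; simpa [h] using hx) hT]
      simp [hx]
    | true =>
      rw [show F ++ T = (F ++ T : List α) from rfl, insertBy_key_true k x (F ++ T) hx]
      have : (F ++ T) ++ [x] = F ++ (T ++ [x]) := by simp
      rw [this, ih F (T ++ [x]) hF
        (by intro a ha; rcases List.mem_append.1 ha with h | h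
            · exact hT a h
            · simp at h; simpa [h] using hx)]
      simp [hx]

-- A's two-accumulator fold is the pair of filters
theorem foldl_insertBy_partition_nil {α : Type} (k : α → Bool) (xs : List α) :
    xs.foldl (fun acc x => PySem.List.insertBy (fun a b => decide (k a < k b)) x acc) []
      = xs.filter (fun a => !k a) ++ xs.filter k := by
  simpa using foldl_insertBy_partition k xs [] [] (by simp) (by simp)

-- A's two-accumulator fold is the pair of filters
theorem foldA_eq_filters (searchQuery : String) (xs : List String) (b n : List String) :
    xs.foldl
      (fun (acc : List String × List String) element =>
        if checkMultiWordQueryContainedExactlyInLine element searchQuery then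
          (acc.1 ++ [element], acc.2)
        else
          (acc.1, acc.2 ++ [element])) (b, n)
      = (b ++ xs.filter (fun e => checkMultiWordQueryContainedExactlyInLine e searchQuery),
         n ++ xs.filter (fun e => !checkMultiWordQueryContainedExactlyInLine e searchQuery)) := by
  induction xs generalizing b n with
  | nil => simp
  | cons x xs ih =>
    simp only [List.foldl_cons]
    cases hx : checkMultiWordQueryContainedExactlyInLine x searchQuery <;>
      simp [hx, ih]

-- ===== VERDICT (by name: the statement is the Claim_ definition above) =====
theorem moveExactMatchesToFront_spec : Claim_equal_moveExactMatchesToFront := by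
  intro myList searchQuery _
  unfold Spec_moveExactMatchesToFront moveExactMatchesToFront moveExactMatchesToFront_alt
  rw [PySem.List.sorted_eq_foldl_insertBy,
    foldl_insertBy_partition_nil (fun e => !checkMultiWordQueryContainedExactlyInLine e searchQuery)]
  rw [foldA_eq_filters]
  simp
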